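-- pv_equiv track=rewrite | github.com/zygarde-intermittent/zygarde | code/ETA-Factor/general_CEE.py | countMinus
-- ===== SOURCE A (Python) =====
-- def countMinus(binary, size):
--     minus = []
--     totalM = []
--     for n in range(1, size):
--         mn = 0
--         ttl = 0
--         for i in range(n, len(binary)-1):
--             flag = 1
--             for j in range(1, n):
--                 if(binary[i-j] == 1):
--                     flag = 0
--             if (flag == 1):
--                 if(binary[i] == 1):
--                     mn = mn+1
--                 ttl = ttl + 1
--         minus.append(mn)
--         totalM.append(ttl)
--     return minus, totalM
-- ===== SOURCE B (Python) =====
-- def countMinus(binary, size):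
--     # Difference/histogram approach: one pass over positions i records, for each i,
--     # the largest window size up for which i still qualifies; suffix sums over that
--     # histogram then give all answers at once.
--     L = len(binary)
--     K = size - 1                 # window sizes n range over 1..K
--     if K < 1:
--         return [], []
--     cntT = {}
--     cntM = {}
--     tot = 0
--     mtot = 0
--     z = 0                        # length of the run of entries != 1 ending just before i
--     for i in range(1, L - 1):
--         z = z + 1 if binary[i - 1] != 1 else 0
--         up = min(i, z + 1, K)    # i qualifies exactly for window sizes n = 1..up
--         cntT[up] = cntT.get(up, 0) + 1
--         tot += 1
--         if binary[i] == 1: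
--             cntM[up] = cntM.get(up, 0) + 1
--             mtot += 1
--     minus = []
--     totalM = []
--     sM, sT = mtot, tot
--     for n in range(1, size):
--         minus.append(sM)
--         totalM.append(sT)
--         sM -= cntM.get(n, 0)
--         sT -= cntT.get(n, 0)
--     return minus, totalM
-- ===== Notes on version B (the rewrite author's own statement) =====
-- stated objective: faster
-- what changed: One pass builds a histogram of each position's maximal qualifying window size (via a running zero-run length), then a single suffix-sum sweep over window sizes produces all counts, replacing A's triple loop that rescans the preceding n-1 bits for every n and i.
import Mathlib
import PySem

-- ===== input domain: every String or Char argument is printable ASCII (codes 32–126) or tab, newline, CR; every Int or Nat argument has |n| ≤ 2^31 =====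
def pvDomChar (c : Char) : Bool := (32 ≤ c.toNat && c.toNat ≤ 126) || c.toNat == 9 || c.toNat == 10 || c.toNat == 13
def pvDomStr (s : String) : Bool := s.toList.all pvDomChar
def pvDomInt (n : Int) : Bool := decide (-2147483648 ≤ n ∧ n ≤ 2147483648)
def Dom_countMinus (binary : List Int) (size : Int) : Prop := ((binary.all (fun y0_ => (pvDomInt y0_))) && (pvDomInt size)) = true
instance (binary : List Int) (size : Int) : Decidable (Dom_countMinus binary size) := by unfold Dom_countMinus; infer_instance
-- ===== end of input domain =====

-- B replaces A's per-n rescans by a one-pass histogram of per-position maximal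
-- window sizes followed by a suffix-sum sweep (objective: faster, asymptotic).


-- ===== PORT A =====
-- All indices binary[i-j] and binary[i] reached by A satisfy 0 ≤ index < len(binary)
-- (i ≥ n ≥ j+1, i ≤ len-2), so pyGetD with default 0 is exact here.
def pvFlagA (binary : List Int) (i n : Int) : Int :=
  (PySem.List.pyRange 1 n 1).foldl
    (fun flag j => if PySem.List.pyGetD binary (i - j) 0 = 1 then 0 else flag) 1

def pvInnerA (binary : List Int) (n : Int) : Int × Int :=
  (PySem.List.pyRange n ((binary.length : Int) - 1) 1).foldl
    (fun mt i =>
      if pvFlagA binary i n = 1 then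
        ((if PySem.List.pyGetD binary i 0 = 1 then mt.1 + 1 else mt.1), mt.2 + 1)
      else mt) ((0 : Int), (0 : Int))

def countMinus (binary : List Int) (size : Int) : List Int × List Int :=
  (PySem.List.pyRange 1 size 1).foldl
    (fun acc n => (acc.1 ++ [(pvInnerA binary n).1], acc.2 ++ [(pvInnerA binary n).2]))
    ([], [])

-- ===== PORT B =====
-- First pass of Source B: running zero-run length z, histogram dicts cntT/cntM keyed by
-- up = min(i, z+1, K), and the two totals; state = (z, cntT, cntM, tot, mtot).
def pvStepB (binary : List Int) (K : Int)
    (st : Int × PySem.Dict Int Int × PySem.Dict Int Int × Int × Int) (i : Int) :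
    Int × PySem.Dict Int Int × PySem.Dict Int Int × Int × Int :=
  let z := if PySem.List.pyGetD binary (i - 1) 0 ≠ 1 then st.1 + 1 else 0
  let up := min (min i (z + 1)) K
  let cntT := st.2.1.insert up (st.2.1.getD up 0 + 1)
  let tot := st.2.2.2.1 + 1
  if PySem.List.pyGetD binary i 0 = 1 then
    (z, cntT, st.2.2.1.insert up (st.2.2.1.getD up 0 + 1), tot, st.2.2.2.2 + 1)
  else
    (z, cntT, st.2.2.1, tot, st.2.2.2.2)

def pvLoop1 (binary : List Int) (K : Int) :
    Int × PySem.Dict Int Int × PySem.Dict Int Int × Int × Int :=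
  (PySem.List.pyRange 1 ((binary.length : Int) - 1) 1).foldl (pvStepB binary K)
    (0, PySem.Dict.empty, PySem.Dict.empty, 0, 0)

def countMinus_alt (binary : List Int) (size : Int) : List Int × List Int :=
  if size - 1 < 1 then ([], [])
  else
    let st := pvLoop1 binary (size - 1)
    let res := (PySem.List.pyRange 1 size 1).foldl
      (fun r n =>
        ((r.1.1 - st.2.2.1.getD n 0, r.1.2 - st.2.1.getD n 0),
         (r.2.1 ++ [r.1.1], r.2.2 ++ [r.1.2])))
      ((st.2.2.2.2, st.2.2.2.1), ([], []))
    res.2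

-- ===== PRECONDITION & SPEC =====
def Spec_countMinus (binary : List Int) (size : Int) (out : List Int × List Int) : Prop := out = countMinus_alt binary size
instance (binary : List Int) (size : Int) (out : List Int × List Int) : Decidable (Spec_countMinus binary size out) := by unfold Spec_countMinus; infer_instance

-- ===== CLAIM (what is proved, stated in full; the proofs are below) =====
def Claim_equal_countMinus : Prop := ∀ (binary : List Int) (size : Int), Dom_countMinus binary size → Spec_countMinus binary size (countMinus binary size)

-- ===== LEMMAS AND PROOFS =====

-- run length of entries ≠ 1 ending just before index k
def pvZv (binary : List Int) : Nat → Int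
  | 0 => 0
  | k + 1 => if binary.getD k 0 ≠ 1 then pvZv binary k + 1 else 0

-- largest window size for which position i qualifies (unclamped)
def pvUv (binary : List Int) (i : Int) : Int := min i (pvZv binary i.toNat + 1)

def pvD (binary : List Int) (i : Int) : Bool := decide (PySem.List.pyGetD binary i 0 = 1)

def pvI (binary : List Int) : List Int := PySem.List.pyRange 1 ((binary.length : Int) - 1) 1

def pvTval (binary : List Int) (n : Int) : Int :=
  ((pvI binary).countP (fun i => decide (n ≤ pvUv binary i)) : Int)

def pvMval (binary : List Int) (n : Int) : Int :=
  (((pvI binary).filter (pvD binary)).countP (fun i => decide (n ≤ pvUv binary i)) : Int)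

lemma pvZv_nonneg (binary : List Int) (k : Nat) : 0 ≤ pvZv binary k := by
  induction k with
  | zero => simp [pvZv]
  | succ k ih => simp only [pvZv]; split <;> omega

-- run length ≥ m iff the m entries just before i are all ≠ 1
lemma pvZv_ge_iff (binary : List Int) (m i : Nat) (hmi : m ≤ i) :
    ((m : Int) ≤ pvZv binary i ↔ ∀ j : Nat, 1 ≤ j → j ≤ m → binary.getD (i - j) 0 ≠ 1) := by
  induction m generalizing i with
  | zero =>
    constructor
    · intro _ j h1 h2; omega
    · intro _; exact_mod_cast pvZv_nonneg binary i
  | succ m ih =>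
    obtain ⟨i', rfl⟩ : ∃ i', i = i' + 1 := ⟨i - 1, by omega⟩
    by_cases hb : binary.getD i' 0 = 1
    · constructor
      · intro h
        exfalso
        have hnn : ¬(binary.getD i' 0 ≠ 1) := by simpa using hb
        have : pvZv binary (i' + 1) = 0 := by simp only [pvZv, if_neg hnn]
        omega
      · intro h
        exfalso
        exact h 1 le_rfl (by omega) (by simpa using hb)
    · have hz : pvZv binary (i' + 1) = pvZv binary i' + 1 := by
        simp only [pvZv, if_pos hb]
      rw [hz]
      have hmi' : m ≤ i' := by omega
      constructor
      · intro h j h1 h2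
        rcases Nat.eq_or_lt_of_le h1 with h1' | h1'
        · simpa [← h1'] using hb
        · have : binary.getD (i' - (j - 1)) 0 ≠ 1 :=
            (ih i' hmi').1 (by push_cast at h ⊢; omega) (j - 1) (by omega) (by omega)
          simpa [show i' + 1 - j = i' - (j - 1) by omega] using this
      · intro h
        have : (m : Int) ≤ pvZv binary i' := by
          refine (ih i' hmi').2 ?_
          intro j h1 h2
          have := h (j + 1) (by omega) (by omega)
          simpa [show i' + 1 - (j + 1) = i' - j by omega] using this
        push_cast
        omega

-- flag fold is 0/1 with 1 iff no scanned entry equals 1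
lemma pvFlag_zero (binary : List Int) (i : Int) (l : List Int) :
    l.foldl (fun flag j => if PySem.List.pyGetD binary (i - j) 0 = 1 then 0 else flag) (0 : Int) = 0 := by
  induction l with
  | nil => rfl
  | cons x l ih => simp only [List.foldl_cons]; split <;> exact ih

lemma pvFlag_eq_ite (binary : List Int) (i : Int) (l : List Int) :
    l.foldl (fun flag j => if PySem.List.pyGetD binary (i - j) 0 = 1 then 0 else flag) (1 : Int)
      = if ∀ j ∈ l, PySem.List.pyGetD binary (i - j) 0 ≠ 1 then 1 else 0 := by
  induction l with
  | nil => simp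
  | cons x l ih =>
    simp only [List.foldl_cons]
    by_cases hx : PySem.List.pyGetD binary (i - x) 0 = 1
    · rw [if_pos hx, pvFlag_zero]
      rw [if_neg]
      intro hc
      exact hc x List.mem_cons_self hx
    · rw [if_neg hx, ih]
      by_cases hall : ∀ j ∈ l, PySem.List.pyGetD binary (i - j) 0 ≠ 1
      · rw [if_pos hall, if_pos]
        intro j hj
        rcases List.mem_cons.1 hj with rfl | hj'
        · exact hx
        · exact hall j hj'
      · rw [if_neg hall, if_neg]
        intro hc
        exact hall fun j hj => hc j (List.mem_cons_of_mem _ hj)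

lemma pvFlagA_eq_one_iff (binary : List Int) (n i : Int) (hn : 1 ≤ n) (hni : n ≤ i) :
    (pvFlagA binary i n = 1) ↔ (n - 1 ≤ pvZv binary i.toNat) := by
  unfold pvFlagA
  rw [pvFlag_eq_ite]
  have hm : ((n - 1).toNat : Int) = n - 1 := by omega
  have hmi : (n - 1).toNat ≤ i.toNat := by omega
  have hiff := pvZv_ge_iff binary (n - 1).toNat i.toNat hmi
  rw [hm] at hiff
  have hforall : (∀ j ∈ PySem.List.pyRange 1 n 1, PySem.List.pyGetD binary (i - j) 0 ≠ 1)
      ↔ (∀ j : Nat, 1 ≤ j → j ≤ (n - 1).toNat → binary.getD (i.toNat - j) 0 ≠ 1) := by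
    constructor
    · intro h j h1 h2
      have hmem : ((j : Nat) : Int) ∈ PySem.List.pyRange 1 n 1 := by
        rw [PySem.List.mem_pyRange_one]; omega
      have := h ((j : Nat) : Int) hmem
      rwa [show i - ((j : Nat) : Int) = ((i.toNat - j : Nat) : Int) by omega,
        PySem.List.pyGetD_natCast] at this
    · intro h j hj
      rw [PySem.List.mem_pyRange_one] at hj
      have := h j.toNat (by omega) (by omega)
      rwa [show i - j = ((i.toNat - j.toNat : Nat) : Int) by omega,
        PySem.List.pyGetD_natCast]
  rw [← hiff] at hforall
  constructor
  · intro h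
    by_cases hc : ∀ j ∈ PySem.List.pyRange 1 n 1, PySem.List.pyGetD binary (i - j) 0 ≠ 1
    · exact hforall.1 hc
    · rw [if_neg hc] at h; omega
  · intro h
    rw [if_pos (hforall.2 h)]

-- A's inner counting loop over range(n, L-1) as countP over pvI
lemma pvCountP_restrict (binary : List Int) (n : Int) (hn : 1 ≤ n) (q : Int → Bool) :
    (PySem.List.pyRange n ((binary.length : Int) - 1) 1).countP
        (fun i => decide (n - 1 ≤ pvZv binary i.toNat) && q i)
      = (pvI binary).countP (fun i => decide (n ≤ pvUv binary i) && q i) := by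
  by_cases hnb : n ≤ (binary.length : Int) - 1
  · rw [pvI, PySem.List.pyRange_one_append 1 n ((binary.length : Int) - 1) hn hnb,
      List.countP_append]
    have h0 : (PySem.List.pyRange 1 n 1).countP
        (fun i => decide (n ≤ pvUv binary i) && q i) = 0 := by
      rw [List.countP_eq_zero]
      intro i hi
      rw [PySem.List.mem_pyRange_one] at hi
      have : ¬(n ≤ pvUv binary i) := by unfold pvUv; omega
      simp [this]
    rw [h0, Nat.zero_add]
    apply List.countP_congr
    intro i hi
    rw [PySem.List.mem_pyRange_one] at hi
    have : (n - 1 ≤ pvZv binary i.toNat) ↔ (n ≤ pvUv binary i) := by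
      unfold pvUv; omega
    simp [this]
  · rw [PySem.List.pyRange_one_eq_nil (by omega), List.countP_nil]
    symm
    rw [List.countP_eq_zero]
    intro i hi
    rw [pvI, PySem.List.mem_pyRange_one] at hi
    have : ¬(n ≤ pvUv binary i) := by unfold pvUv; omega
    simp [this]

lemma pvInnerA_eq (binary : List Int) (n : Int) (hn : 1 ≤ n) :
    pvInnerA binary n = (pvMval binary n, pvTval binary n) := by
  unfold pvInnerA
  have hstep : (PySem.List.pyRange n ((binary.length : Int) - 1) 1).foldl
      (fun mt i =>
        if pvFlagA binary i n = 1 then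
          ((if PySem.List.pyGetD binary i 0 = 1 then mt.1 + 1 else mt.1), mt.2 + 1)
        else mt) ((0 : Int), (0 : Int))
      = (PySem.List.pyRange n ((binary.length : Int) - 1) 1).foldl
      (fun mt i =>
        ((if decide (n - 1 ≤ pvZv binary i.toNat) && pvD binary i then mt.1 + 1 else mt.1),
         (if decide (n - 1 ≤ pvZv binary i.toNat) then mt.2 + 1 else mt.2)))
        ((0 : Int), (0 : Int)) := by
    apply PySem.List.foldl_congr_mem
    intro mt i hi
    rw [PySem.List.mem_pyRange_one] at hi
    have hflag := pvFlagA_eq_one_iff binary n i hn hi.1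
    by_cases hc : n - 1 ≤ pvZv binary i.toNat
    · rw [if_pos (hflag.2 hc)]
      simp only [hc, decide_true, Bool.true_and, if_pos]
      unfold pvD
      by_cases hd : PySem.List.pyGetD binary i 0 = 1 <;> simp [hd]
    · rw [if_neg (fun h => hc (hflag.1 h))]
      simp [hc]
  rw [hstep,
    PySem.List.foldl_prod_mk
      (f := fun a i => if decide (n - 1 ≤ pvZv binary i.toNat) && pvD binary i then a + 1 else a)
      (g := fun a i => if decide (n - 1 ≤ pvZv binary i.toNat) then a + 1 else a),
    PySem.List.foldl_if_add_one, PySem.List.foldl_if_add_one]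
  have hT := pvCountP_restrict binary n hn (fun _ => true)
  simp only [Bool.and_true] at hT
  have hM := pvCountP_restrict binary n hn (pvD binary)
  rw [hM, hT]
  unfold pvMval pvTval
  rw [← List.countP_filter]
  simp

-- A computes the per-n values pvMval / pvTval
lemma countMinus_eq_maps (binary : List Int) (size : Int) :
    countMinus binary size
      = ((PySem.List.pyRange 1 size 1).map (pvMval binary),
         (PySem.List.pyRange 1 size 1).map (pvTval binary)) := by
  unfold countMinus
  have h : (PySem.List.pyRange 1 size 1).foldl
      (fun acc n => (acc.1 ++ [(pvInnerA binary n).1], acc.2 ++ [(pvInnerA binary n).2]))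
      ([], [])
      = (PySem.List.pyRange 1 size 1).foldl
      (fun acc n => (acc.1 ++ [pvMval binary n], acc.2 ++ [pvTval binary n])) ([], []) := by
    apply PySem.List.foldl_congr_mem
    intro acc n hn
    rw [PySem.List.mem_pyRange_one] at hn
    rw [pvInnerA_eq binary n hn.1]
  rw [h,
    PySem.List.foldl_prod_mk
      (f := fun a n => a ++ [pvMval binary n])
      (g := fun a n => a ++ [pvTval binary n]),
    PySem.List.foldl_append_singleton_eq_map, PySem.List.foldl_append_singleton_eq_map]
  simp

-- count of a value under a map, as countP
lemma pvCount_map (l : List Int) (f : Int → Int) (v : Int) :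
    (l.map f).count v = l.countP (fun x => f x == v) := by
  induction l with
  | nil => rfl
  | cons x t ih => simp [List.count_cons, List.countP_cons, ih]

lemma pvCountP_lt_succ (l : List Int) (f : Int → Int) (n : Int) :
    l.countP (fun x => decide (f x < n + 1))
      = l.countP (fun x => decide (f x < n)) + (l.map f).count n := by
  rw [pvCount_map]
  induction l with
  | nil => rfl
  | cons x t ih =>
    simp only [List.countP_cons, ih]
    by_cases h1 : f x < n
    · simp [h1, show f x < n + 1 by omega, show ¬(f x = n) by omega]
      omega
    · by_cases h2 : f x = n
      · simp [h2]; omega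
      · simp [h1, h2, show ¬(f x < n + 1) by omega]

-- prefix histogram sums are prefix counts
lemma pvSum_counts (l : List Int) (f : Int → Int) (hf : ∀ x ∈ l, 1 ≤ f x) (n : Int) (hn : 1 ≤ n) :
    ((PySem.List.pyRange 1 n 1).map (fun u => ((l.map f).count u : Int))).sum
      = (l.countP (fun x => decide (f x < n)) : Int) := by
  induction n, hn using Int.le_induction with
  | base =>
    rw [PySem.List.pyRange_one_eq_nil (by omega)]
    have h0 : l.countP (fun x => decide (f x < 1)) = 0 := by
      rw [List.countP_eq_zero]
      intro x hx
      have := hf x hx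
      simp; omega
    simp [h0]
  | succ m hm ih =>
    rw [PySem.List.pyRange_one_succ_right (by omega), List.map_append, List.sum_append, ih,
      pvCountP_lt_succ l f m]
    push_cast
    simp

-- the central counting identity: total minus prefix counts = suffix count
lemma pvSuffix_count (l : List Int) (f : Int → Int) (hf : ∀ x ∈ l, 1 ≤ f x)
    (n : Int) (hn : 1 ≤ n) :
    (l.length : Int) - ((PySem.List.pyRange 1 n 1).map (fun u => ((l.map f).count u : Int))).sum
      = (l.countP (fun x => decide (n ≤ f x)) : Int) := by
  rw [pvSum_counts l f hf n hn]
  have hsplit : l.countP (fun x => decide (f x < n)) + l.countP (fun x => decide (n ≤ f x))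
      = l.length := by
    have := List.length_eq_countP_add_countP (l := l) (fun x => decide (f x < n))
    rw [this]
    congr 1
    apply List.countP_congr
    intro x _
    by_cases h : f x < n <;> simp [h, show (n ≤ f x) ↔ ¬(f x < n) by omega]
  omega

-- characterization of B's first pass
lemma pvLoop1_inv (binary : List Int) (K : Int) (m : Nat)
    (hmL : (m : Int) ≤ (binary.length : Int) - 1) :
    (PySem.List.pyRange 1 (m : Int) 1).foldl (pvStepB binary K)
      ((0 : Int), PySem.Dict.empty, PySem.Dict.empty, (0 : Int), (0 : Int))
    = (pvZv binary (m - 1),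
       ((PySem.List.pyRange 1 (m : Int) 1).map (fun i => min (pvUv binary i) K)).foldl
         (fun d x => d.insert x (d.getD x 0 + 1)) PySem.Dict.empty,
       (((PySem.List.pyRange 1 (m : Int) 1).filter (pvD binary)).map (fun i => min (pvUv binary i) K)).foldl
         (fun d x => d.insert x (d.getD x 0 + 1)) PySem.Dict.empty,
       ((PySem.List.pyRange 1 (m : Int) 1).length : Int),
       ((PySem.List.pyRange 1 (m : Int) 1).countP (pvD binary) : Int)) := by
  induction m with
  | zero => rw [PySem.List.pyRange_one_eq_nil (by omega)]; rfl
  | succ m ih =>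
    rcases Nat.eq_zero_or_pos m with hm0 | hm1
    · subst hm0
      rw [show ((0 + 1 : Nat) : Int) = 1 by omega, PySem.List.pyRange_one_eq_nil (by omega)]
      rfl
    · have hm : (1 : Int) ≤ (m : Int) := by omega
      have hr : PySem.List.pyRange 1 ((m : Int) + 1) 1
          = PySem.List.pyRange 1 (m : Int) 1 ++ [(m : Int)] :=
        PySem.List.pyRange_one_succ_right hm
      push_cast
      rw [hr, List.foldl_append, ih (by omega)]
      simp only [List.foldl_cons, List.foldl_nil, pvStepB]
      have hz : (if PySem.List.pyGetD binary ((m : Int) - 1) 0 ≠ 1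
          then pvZv binary (m - 1) + 1 else 0) = pvZv binary m := by
        rw [show ((m : Int) - 1) = ((m - 1 : Nat) : Int) by omega, PySem.List.pyGetD_natCast]
        conv_rhs => rw [show m = (m - 1) + 1 by omega]
        rfl
      have hup : min (min (m : Int) ((if PySem.List.pyGetD binary ((m : Int) - 1) 0 ≠ 1
            then pvZv binary (m - 1) + 1 else 0) + 1)) K
          = min (pvUv binary (m : Int)) K := by
        rw [hz]
        unfold pvUv
        rw [Int.toNat_natCast]
      have hmapT : (PySem.List.pyRange 1 (m : Int) 1 ++ [(m : Int)]).map
            (fun i => min (pvUv binary i) K)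
          = (PySem.List.pyRange 1 (m : Int) 1).map (fun i => min (pvUv binary i) K)
            ++ [min (pvUv binary (m : Int)) K] := by
        rw [List.map_append]; rfl
      have hup2 : min (min (m : Int) (pvZv binary m + 1)) K = min (pvUv binary (m : Int)) K := by
        rw [← hz, hup]
      have hlen2 : ((PySem.List.pyRange 1 (m : Int) 1 ++ [(m : Int)]).length : Int)
          = ((PySem.List.pyRange 1 (m : Int) 1).length : Int) + 1 := by
        simp
      by_cases hd : PySem.List.pyGetD binary (m : Int) 0 = 1
      · have hdT : pvD binary (m : Int) = true := by
          simp only [pvD, decide_eq_true_eq]; exact hd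
        rw [if_pos hd]
        have hfilt : (PySem.List.pyRange 1 (m : Int) 1 ++ [(m : Int)]).filter (pvD binary)
            = (PySem.List.pyRange 1 (m : Int) 1).filter (pvD binary) ++ [(m : Int)] := by
          rw [List.filter_append]
          simp only [List.filter_cons, hdT, if_pos, List.filter_nil]
        have hcnt : ((PySem.List.pyRange 1 (m : Int) 1 ++ [(m : Int)]).countP (pvD binary) : Int)
            = ((PySem.List.pyRange 1 (m : Int) 1).countP (pvD binary) : Int) + 1 := by
          rw [List.countP_append]
          simp [hdT]
        rw [hmapT, hfilt, hcnt, hlen2, hz, hup2]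
        simp [List.map_append, List.foldl_append]
      · have hdT : pvD binary (m : Int) = false := by
          simp only [pvD, decide_eq_false_iff_not]; exact hd
        rw [if_neg hd]
        have hfilt : (PySem.List.pyRange 1 (m : Int) 1 ++ [(m : Int)]).filter (pvD binary)
            = (PySem.List.pyRange 1 (m : Int) 1).filter (pvD binary) := by
          rw [List.filter_append]
          simp [hdT]
        have hcnt : ((PySem.List.pyRange 1 (m : Int) 1 ++ [(m : Int)]).countP (pvD binary) : Int)
            = ((PySem.List.pyRange 1 (m : Int) 1).countP (pvD binary) : Int) := by
          rw [List.countP_append]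
          simp [hdT]
        rw [hmapT, hfilt, hcnt, hlen2, hz, hup2]
        simp [List.foldl_append]

-- B's first pass, final form over pvI
lemma pvLoop1_eq (binary : List Int) (K : Int) :
    pvLoop1 binary K
    = (pvZv binary (binary.length - 1 - 1),
       ((pvI binary).map (fun i => min (pvUv binary i) K)).foldl
         (fun d x => d.insert x (d.getD x 0 + 1)) PySem.Dict.empty,
       (((pvI binary).filter (pvD binary)).map (fun i => min (pvUv binary i) K)).foldl
         (fun d x => d.insert x (d.getD x 0 + 1)) PySem.Dict.empty,
       ((pvI binary).length : Int),
       ((pvI binary).countP (pvD binary) : Int)) := by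
  unfold pvLoop1 pvI
  rcases Nat.eq_zero_or_pos binary.length with h0 | h1
  · rw [h0]
    rw [PySem.List.pyRange_one_eq_nil (by omega)]
    rfl
  · have hc : ((binary.length : Int) - 1) = (((binary.length - 1 : Nat)) : Int) := by omega
    rw [hc, pvLoop1_inv binary K (binary.length - 1) (by omega)]

-- prefix-sum state of B's second pass
def pvPreI (c : PySem.Dict Int Int) (n : Int) : Int :=
  ((PySem.List.pyRange 1 n 1).map (fun u => c.getD u 0)).sum

lemma pvLoop2_inv (cM cT : PySem.Dict Int Int) (mt tt : Int) (m : Nat) :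
    (PySem.List.pyRange 1 (m : Int) 1).foldl
      (fun r n =>
        ((r.1.1 - cM.getD n 0, r.1.2 - cT.getD n 0),
         (r.2.1 ++ [r.1.1], r.2.2 ++ [r.1.2])))
      ((mt, tt), ([], []))
    = ((mt - pvPreI cM (m : Int), tt - pvPreI cT (m : Int)),
       ((PySem.List.pyRange 1 (m : Int) 1).map (fun n => mt - pvPreI cM n),
        (PySem.List.pyRange 1 (m : Int) 1).map (fun n => tt - pvPreI cT n))) := by
  induction m with
  | zero =>
    rw [PySem.List.pyRange_one_eq_nil (by omega)]
    simp [pvPreI, PySem.List.pyRange_one_eq_nil (by omega : (0:Int) ≤ 1)]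
  | succ m ih =>
    rcases Nat.eq_zero_or_pos m with hm0 | hm1
    · subst hm0
      rw [show ((0 + 1 : Nat) : Int) = 1 by omega, PySem.List.pyRange_one_eq_nil (by omega)]
      simp [pvPreI, PySem.List.pyRange_one_eq_nil (le_refl (1:Int))]
    · have hm : (1 : Int) ≤ (m : Int) := by omega
      have hr : PySem.List.pyRange 1 ((m : Int) + 1) 1
          = PySem.List.pyRange 1 (m : Int) 1 ++ [(m : Int)] :=
        PySem.List.pyRange_one_succ_right hm
      have hpreM : pvPreI cM ((m : Int) + 1) = pvPreI cM (m : Int) + cM.getD (m : Int) 0 := by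
        unfold pvPreI
        rw [hr, List.map_append, List.sum_append]
        simp
      have hpreT : pvPreI cT ((m : Int) + 1) = pvPreI cT (m : Int) + cT.getD (m : Int) 0 := by
        unfold pvPreI
        rw [hr, List.map_append, List.sum_append]
        simp
      push_cast
      rw [hr, List.foldl_append, ih]
      simp only [List.foldl_cons, List.foldl_nil, List.map_append, List.map_cons, List.map_nil]
      rw [hpreM, hpreT]
      simp only [Prod.mk.injEq]
      exact ⟨⟨by ring, by ring⟩, trivial⟩

-- per-position qualifying size is ≥ 1 on pvI (given 1 ≤ K)
lemma pvUpK_ge_one (binary : List Int) (K : Int) (hK : 1 ≤ K) :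
    ∀ x ∈ pvI binary, 1 ≤ min (pvUv binary x) K := by
  intro x hx
  rw [pvI, PySem.List.mem_pyRange_one] at hx
  have := pvZv_nonneg binary x.toNat
  unfold pvUv
  omega

-- the per-n agreement of the suffix sums with pvMval / pvTval
lemma pvSuffix_eq (binary : List Int) (K : Int) (hK : 1 ≤ K) (l : List Int)
    (hl : ∀ x ∈ l, x ∈ pvI binary) (n : Int) (hn : 1 ≤ n) (hnK : n ≤ K) :
    (l.length : Int)
      - pvPreI ((l.map (fun i => min (pvUv binary i) K)).foldl
          (fun d x => d.insert x (d.getD x 0 + 1)) PySem.Dict.empty) n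
    = (l.countP (fun i => decide (n ≤ pvUv binary i)) : Int) := by
  have hget : ∀ u : Int,
      ((l.map (fun i => min (pvUv binary i) K)).foldl
        (fun d x => d.insert x (d.getD x 0 + 1)) PySem.Dict.empty).getD u 0
      = ((l.map (fun i => min (pvUv binary i) K)).count u : Int) := by
    intro u
    rw [PySem.Dict.getD_foldl_insert_add_one]
    simp
  have hpre : pvPreI ((l.map (fun i => min (pvUv binary i) K)).foldl
        (fun d x => d.insert x (d.getD x 0 + 1)) PySem.Dict.empty) n
      = ((PySem.List.pyRange 1 n 1).map
          (fun u => ((l.map (fun i => min (pvUv binary i) K)).count u : Int))).sum := by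
    unfold pvPreI
    congr 1
    apply List.map_congr_left
    intro u _
    exact hget u
  rw [hpre, pvSuffix_count l (fun i => min (pvUv binary i) K)
    (fun x hx => pvUpK_ge_one binary K hK x (hl x hx)) n hn]
  congr 1
  apply List.countP_congr
  intro x _
  have : (n ≤ min (pvUv binary x) K) ↔ (n ≤ pvUv binary x) := by omega
  simp [this]

-- ===== VERDICT (by name: the statement is the Claim_ definition above) =====
theorem countMinus_spec : Claim_equal_countMinus := by
  intro binary size _
  unfold Spec_countMinus
  rw [countMinus_eq_maps]
  by_cases hsz : size - 1 < 1
  · unfold countMinus_alt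
    rw [if_pos hsz, PySem.List.pyRange_one_eq_nil (by omega)]
    rfl
  · have hK : 1 ≤ size - 1 := by omega
    unfold countMinus_alt
    rw [if_neg hsz]
    simp only [pvLoop1_eq binary (size - 1)]
    have hcast : ((size.toNat : Nat) : Int) = size := by omega
    rw [show PySem.List.pyRange 1 size 1 = PySem.List.pyRange 1 ((size.toNat : Nat) : Int) 1 by
      rw [hcast]]
    rw [pvLoop2_inv]
    rw [hcast]
    have hT : ∀ n ∈ PySem.List.pyRange 1 size 1,
        ((pvI binary).length : Int)
          - pvPreI (((pvI binary).map (fun i => min (pvUv binary i) (size - 1))).foldl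
              (fun d x => d.insert x (d.getD x 0 + 1)) PySem.Dict.empty) n
        = pvTval binary n := by
      intro n hn
      rw [PySem.List.mem_pyRange_one] at hn
      exact pvSuffix_eq binary (size - 1) hK (pvI binary) (fun x hx => hx) n hn.1 (by omega)
    have hM : ∀ n ∈ PySem.List.pyRange 1 size 1,
        (((pvI binary).countP (pvD binary) : Nat) : Int)
          - pvPreI ((((pvI binary).filter (pvD binary)).map
                (fun i => min (pvUv binary i) (size - 1))).foldl
              (fun d x => d.insert x (d.getD x 0 + 1)) PySem.Dict.empty) n
        = pvMval binary n := by
      intro n hn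
      rw [PySem.List.mem_pyRange_one] at hn
      have := pvSuffix_eq binary (size - 1) hK ((pvI binary).filter (pvD binary))
        (fun x hx => List.mem_of_mem_filter hx) n hn.1 (by omega)
      unfold pvMval
      rw [← this, List.countP_eq_length_filter]
    simp only [Prod.mk.injEq]
    constructor
    · apply List.map_congr_left
      intro n hn
      exact (hM n hn).symm
    · apply List.map_congr_left
      intro n hn
      exact (hT n hn).symm
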